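-- pv_equiv track=rewrite | github.com/hhheeeeee/alogirithm-solved | baekjoon/10997.py | append_star
-- ===== SOURCE A (Python) =====
-- def append_star(LEN): # 3
--
--     if LEN == 2:
--         return ["*****","*    ","* ***","* * *","* * *","*   *","*****"]
--
--     Stars = append_star(LEN-1) # ['*']
--     L = []
--     upper = '*' * (1 + 4 * (LEN - 1))
--     second_u = '*'+ " " * (4 * (LEN - 1))
--     second_b = '*'+ " " * ((4 * (LEN - 1)) - 1)+ "*"
--     L.append(upper)
--     L.append(second_u)
--     L.append("* " +Stars[0]+"**")
--     for S in Stars[1:]: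
--         L.append("* "+ S + " *")
--     L.append(second_b)
--     L.append(upper)
--
--     return L
-- ===== SOURCE B (Python) =====
-- def append_star(LEN):
--     # Build each row of the spiral directly: row r lies on nested frame
--     # k (determined from r alone); the row is an alternating "* " margin,
--     # a middle pattern given by the row's position inside its frame, and
--     # an alternating " *" margin.  One pass, no recursion.
--     if LEN < 2:
--         raise ValueError("LEN must be at least 2")
--     W = 4 * LEN - 3
--     H = 4 * LEN - 1
--     rows = []
--     for r in range(H):
--         k = min(max(0, (r - 1) // 2), max(0, (H - 1 - r) // 2))
--         w2 = W - 4 * k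
--         h2 = H - 4 * k
--         r2 = r - 2 * k
--         if r2 == 0 or r2 == h2 - 1:
--             mid = '*' * w2
--         elif r2 == 1:
--             mid = '*' + ' ' * (w2 - 1)
--         elif r2 == 2:
--             mid = '* ' + '*' * (w2 - 2)
--         else:  # r2 == h2 - 2
--             mid = '*' + ' ' * (w2 - 2) + '*'
--         rows.append('* ' * k + mid + ' *' * k)
--     return rows
-- ===== Notes on version B (the rewrite author's own statement) =====
-- stated objective: faster
-- what changed: B builds each row of the spiral directly (closed-form frame index from the row number, C-level string repetition for the margins and middle pattern) in one pass over the rows, instead of A's recursion on LEN that re-wraps and re-copies the whole previous grid at every level.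
import Mathlib
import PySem

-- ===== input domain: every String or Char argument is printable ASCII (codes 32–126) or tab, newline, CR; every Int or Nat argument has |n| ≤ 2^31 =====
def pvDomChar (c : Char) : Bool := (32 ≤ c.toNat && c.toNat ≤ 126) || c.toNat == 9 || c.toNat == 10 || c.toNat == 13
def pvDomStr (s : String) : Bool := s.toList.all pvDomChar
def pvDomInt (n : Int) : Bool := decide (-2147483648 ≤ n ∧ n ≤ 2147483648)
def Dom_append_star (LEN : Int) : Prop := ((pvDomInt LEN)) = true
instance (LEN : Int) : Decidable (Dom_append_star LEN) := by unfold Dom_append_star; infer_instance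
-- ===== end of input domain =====

-- B rebuilds the spiral row by row from a closed-form frame index instead of recursing
-- on LEN and re-wrapping the whole previous grid (objective: faster, O(LEN^2) vs O(LEN^3)).
-- Strings are modelled as List Char internally (PySem.Chars style) and packed with String.mk.

-- ===== PORT A =====
-- the LEN == 2 base case, as char rows
def pvBase : List (List Char) :=
  ["*****".toList, "*    ".toList, "* ***".toList, "* * *".toList,
   "* * *".toList, "*   *".toList, "*****".toList]

-- one unfolding of A's body for LEN ≠ 2 (Stars = append_star(LEN-1));
-- Stars[0] is PySem.List.pyGet?; the .getD [] branch is dead: every reachable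
-- Stars has ≥ 7 rows (Python would raise IndexError only on an empty list, never reached)
def pvWrapA (LEN : Int) (Stars : List (List Char)) : List (List Char) :=
  let upper := PySem.List.pyRepeat ['*'] (1 + 4 * (LEN - 1))
  let second_u := ['*'] ++ PySem.List.pyRepeat [' '] (4 * (LEN - 1))
  let second_b := ['*'] ++ PySem.List.pyRepeat [' '] ((4 * (LEN - 1)) - 1) ++ ['*']
  let L := [upper, second_u, "* ".toList ++ (PySem.List.pyGet? Stars 0).getD [] ++ "**".toList]
  let L := (PySem.List.slice Stars (some 1) none).foldl
             (fun acc S => acc ++ ["* ".toList ++ S ++ " *".toList]) L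
  L ++ [second_b, upper]

-- A's recursion, fuel-indexed ((LEN-1).toNat suffices for every LEN ≥ 2;
-- for LEN < 2 Python recurses forever — RecursionError — and the fuel-out [] is never claimed)
def pvGoA : Nat → Int → List (List Char)
  | 0, _ => []
  | f + 1, LEN => if LEN = 2 then pvBase else pvWrapA LEN (pvGoA f (LEN - 1))

def append_star (LEN : Int) : List String :=
  (pvGoA (LEN - 1).toNat LEN).map String.mk

-- ===== PORT B =====
-- the middle pattern of a row: position r2 inside its w2 × h2 frame
def pvMid (w2 h2 r2 : Int) : List Char :=
  if r2 = 0 ∨ r2 = h2 - 1 then PySem.List.pyRepeat ['*'] w2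
  else if r2 = 1 then ['*'] ++ PySem.List.pyRepeat [' '] (w2 - 1)
  else if r2 = 2 then ['*', ' '] ++ PySem.List.pyRepeat ['*'] (w2 - 2)
  else ['*'] ++ PySem.List.pyRepeat [' '] (w2 - 2) ++ ['*']

-- row r of the W × H grid: "* " margin, middle pattern, " *" margin
def pvRowB (W H r : Int) : List Char :=
  let k := min (max 0 (PySem.Int.floordiv (r - 1) 2)) (max 0 (PySem.Int.floordiv (H - 1 - r) 2))
  PySem.List.pyRepeat ['*', ' '] k ++ pvMid (W - 4 * k) (H - 4 * k) (r - 2 * k)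
    ++ PySem.List.pyRepeat [' ', '*'] k

def append_star_alt (LEN : Int) : List String :=
  -- Source B raises ValueError for LEN < 2 (outside Pre_); the port returns [] there
  if LEN < 2 then []
  else
    let W := 4 * LEN - 3
    let H := 4 * LEN - 1
    (PySem.List.pyRange 0 H 1).foldl (fun rows r => rows ++ [String.mk (pvRowB W H r)]) []

-- ===== PRECONDITION & SPEC =====
-- Pre_ excludes LEN < 2, where A recurses past its only base case and raises
-- RecursionError (B rejects those inputs with a ValueError)
def Pre_append_star (LEN : Int) : Prop := 1 < LEN
instance (LEN : Int) : Decidable (Pre_append_star LEN) := by unfold Pre_append_star; infer_instance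
def pvWitness_append_star : Int := (2)

def Spec_append_star (LEN : Int) (out : List String) : Prop := out = append_star_alt LEN
instance (LEN : Int) (out : List String) : Decidable (Spec_append_star LEN out) := by unfold Spec_append_star; infer_instance

-- ===== CLAIM (what is proved, stated in full; the proofs are below) =====
def Claim_equal_append_star : Prop := ∀ (LEN : Int), Dom_append_star LEN → Pre_append_star LEN → Spec_append_star LEN (append_star LEN)

-- ===== LEMMAS AND PROOFS =====

-- B's grid as char rows (proof-side view of append_star_alt's loop)
def pvGridB (LEN : Int) : List (List Char) :=
  (PySem.List.pyRange 0 (4 * LEN - 1) 1).map (pvRowB (4 * LEN - 3) (4 * LEN - 1))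

lemma pvGridB_alt (LEN : Int) (h : 2 ≤ LEN) : append_star_alt LEN = (pvGridB LEN).map String.mk := by
  unfold append_star_alt pvGridB
  rw [if_neg (by omega), PySem.List.foldl_append_singleton_eq_map]
  simp [List.map_map, Function.comp]

lemma pyRepeat_peel {α : Type} (xs : List α) (n : Int) (h : 0 < n) :
    PySem.List.pyRepeat xs n = xs ++ PySem.List.pyRepeat xs (n - 1) := by
  unfold PySem.List.pyRepeat
  rw [show n.toNat = (n - 1).toNat + 1 by omega, List.replicate_succ, List.flatten_cons]

lemma pyRepeat_peel_right {α : Type} (xs : List α) (n : Int) (h : 0 < n) :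
    PySem.List.pyRepeat xs n = PySem.List.pyRepeat xs (n - 1) ++ xs := by
  unfold PySem.List.pyRepeat
  rw [show n.toNat = (n - 1).toNat + 1 by omega, List.replicate_succ', List.flatten_append]
  simp

-- the five row shapes of B, for a frame of width W ≥ 5 (so H ≥ 7: no case collisions)
lemma pvRowB_zero (W H : Int) (_hW : 5 ≤ W) (_hH : H = W + 2) :
    pvRowB W H 0 = PySem.List.pyRepeat ['*'] W := by
  simp only [pvRowB, PySem.Int.floordiv_eq_ediv_of_pos (show (0:Int) < 2 by norm_num)]
  rw [show min (max 0 (((0:Int) - 1) / 2)) (max 0 ((H - 1 - 0) / 2)) = 0 by omega]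
  simp [pvMid, PySem.List.pyRepeat]

lemma pvRowB_one (W H : Int) (hW : 5 ≤ W) (hH : H = W + 2) :
    pvRowB W H 1 = ['*'] ++ PySem.List.pyRepeat [' '] (W - 1) := by
  simp only [pvRowB, PySem.Int.floordiv_eq_ediv_of_pos (show (0:Int) < 2 by norm_num)]
  rw [show min (max 0 (((1:Int) - 1) / 2)) (max 0 ((H - 1 - 1) / 2)) = 0 by omega]
  rw [pvMid, if_neg (by omega), if_pos (by norm_num)]
  simp [PySem.List.pyRepeat]

lemma pvRowB_two (W H : Int) (hW : 5 ≤ W) (hH : H = W + 2) :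
    pvRowB W H 2 = ['*', ' '] ++ PySem.List.pyRepeat ['*'] (W - 2) := by
  simp only [pvRowB, PySem.Int.floordiv_eq_ediv_of_pos (show (0:Int) < 2 by norm_num)]
  rw [show min (max 0 (((2:Int) - 1) / 2)) (max 0 ((H - 1 - 2) / 2)) = 0 by omega]
  rw [pvMid, if_neg (by omega), if_neg (by omega), if_pos (by norm_num)]
  simp [PySem.List.pyRepeat]

lemma pvRowB_botTwo (W H : Int) (hW : 5 ≤ W) (hH : H = W + 2) :
    pvRowB W H (H - 2) = ['*'] ++ PySem.List.pyRepeat [' '] (W - 2) ++ ['*'] := by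
  simp only [pvRowB, PySem.Int.floordiv_eq_ediv_of_pos (show (0:Int) < 2 by norm_num)]
  rw [show min (max 0 ((H - 2 - 1) / 2)) (max 0 ((H - 1 - (H - 2)) / 2)) = 0 by omega]
  rw [pvMid, if_neg (by omega), if_neg (by omega), if_neg (by omega)]
  simp [PySem.List.pyRepeat]

lemma pvRowB_botOne (W H : Int) (_hW : 5 ≤ W) (_hH : H = W + 2) :
    pvRowB W H (H - 1) = PySem.List.pyRepeat ['*'] W := by
  simp only [pvRowB, PySem.Int.floordiv_eq_ediv_of_pos (show (0:Int) < 2 by norm_num)]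
  rw [show min (max 0 ((H - 1 - 1) / 2)) (max 0 ((H - 1 - (H - 1)) / 2)) = 0 by omega]
  rw [pvMid, if_pos (by omega)]
  simp [PySem.List.pyRepeat]

lemma pvRowB_mid (W H r : Int) (_hW : 9 ≤ W) (_hH : H = W + 2) (hr : 3 ≤ r) (hr2 : r ≤ H - 3) :
    pvRowB W H r = ['*', ' '] ++ pvRowB (W - 4) (H - 4) (r - 2) ++ [' ', '*'] := by
  simp only [pvRowB, PySem.Int.floordiv_eq_ediv_of_pos (show (0:Int) < 2 by norm_num)]
  set K1 := min (max 0 ((r - 1) / 2)) (max 0 ((H - 1 - r) / 2)) with hK1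
  set K2 := min (max 0 ((r - 2 - 1) / 2)) (max 0 ((H - 4 - 1 - (r - 2)) / 2)) with hK2
  have hK : K1 = K2 + 1 := by omega
  have hK2n : 0 ≤ K2 := by omega
  rw [show W - 4 * K1 = W - 4 - 4 * K2 by omega, show H - 4 * K1 = H - 4 - 4 * K2 by omega,
      show r - 2 * K1 = r - 2 - 2 * K2 by omega, hK,
      pyRepeat_peel ['*', ' '] (K2 + 1) (by omega), pyRepeat_peel_right [' ', '*'] (K2 + 1) (by omega),
      show K2 + 1 - 1 = K2 by ring]
  simp

-- the wrap step: B's grid satisfies A's recurrence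
lemma gridB_head (M : Int) (h2 : 2 ≤ M) :
    pvGridB M = pvRowB (4 * M - 3) (4 * M - 1) 0 :: (PySem.List.pyRange 1 (4 * M - 1) 1).map (pvRowB (4 * M - 3) (4 * M - 1)) := by
  unfold pvGridB
  rw [PySem.List.pyRange_one_cons (by omega), List.map_cons]
  norm_num

lemma pvRowB_one' (W H r : Int) (hW : 5 ≤ W) (hH : H = W + 2) (hr : r = 1) :
    pvRowB W H r = ['*'] ++ PySem.List.pyRepeat [' '] (W - 1) := by
  subst hr; exact pvRowB_one W H hW hH

lemma pvRowB_two' (W H r : Int) (hW : 5 ≤ W) (hH : H = W + 2) (hr : r = 2) :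
    pvRowB W H r = ['*', ' '] ++ PySem.List.pyRepeat ['*'] (W - 2) := by
  subst hr; exact pvRowB_two W H hW hH

lemma pvRowB_botTwo' (W H r : Int) (hW : 5 ≤ W) (hH : H = W + 2) (hr : r = H - 2) :
    pvRowB W H r = ['*'] ++ PySem.List.pyRepeat [' '] (W - 2) ++ ['*'] := by
  subst hr; exact pvRowB_botTwo W H hW hH

lemma pvRowB_botOne' (W H r : Int) (hW : 5 ≤ W) (hH : H = W + 2) (hr : r = H - 1) :
    pvRowB W H r = PySem.List.pyRepeat ['*'] W := by
  subst hr; exact pvRowB_botOne W H hW hH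

lemma pvGridB_step (LEN : Int) (h : 3 ≤ LEN) :
    pvGridB LEN = pvWrapA LEN (pvGridB (LEN - 1)) := by
  have hW : (5:Int) ≤ 4 * (LEN - 1) - 3 := by omega
  have hH : 4 * (LEN - 1) - 1 = 4 * (LEN - 1) - 3 + 2 := by ring
  -- the right-hand side, made explicit
  rw [pvWrapA]
  simp only [gridB_head (LEN - 1) (by omega), PySem.List.slice_from_one, List.tail_cons,
             PySem.List.pyGet?_zero, List.getElem?_cons_zero, Option.getD_some,
             PySem.List.foldl_append_singleton_eq_map]
  -- the left-hand side, split into rows 0,1,2 / 3..H-3 / H-2,H-1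
  unfold pvGridB
  rw [PySem.List.pyRange_one_cons (by omega : (0:Int) < 4 * LEN - 1),
      PySem.List.pyRange_one_cons (by omega : (0:Int) + 1 < 4 * LEN - 1),
      PySem.List.pyRange_one_cons (by omega : (0:Int) + 1 + 1 < 4 * LEN - 1),
      PySem.List.pyRange_one_append (0 + 1 + 1 + 1) (4 * LEN - 3) (4 * LEN - 1) (by omega) (by omega),
      PySem.List.pyRange_one_cons (by omega : 4 * LEN - 3 < 4 * LEN - 1),
      PySem.List.pyRange_one_cons (by omega : 4 * LEN - 3 + 1 < 4 * LEN - 1),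
      PySem.List.pyRange_one_eq_nil (by omega : 4 * LEN - 1 ≤ 4 * LEN - 3 + 1 + 1)]
  simp only [List.map_append, List.map_cons, List.map_nil]
  -- middle block: shift the range and apply pvRowB_mid
  have hmid : (PySem.List.pyRange (0 + 1 + 1 + 1) (4 * LEN - 3) 1).map (pvRowB (4 * LEN - 3) (4 * LEN - 1))
      = ((PySem.List.pyRange 1 (4 * (LEN - 1) - 1) 1).map (pvRowB (4 * (LEN - 1) - 3) (4 * (LEN - 1) - 1))).map
          (fun S => "* ".toList ++ S ++ " *".toList) := by
    rw [PySem.List.pyRange_one, PySem.List.pyRange_one]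
    simp only [List.map_map]
    rw [show ((4 * LEN - 3 : Int) - (0 + 1 + 1 + 1)).toNat = ((4 * (LEN - 1) - 1 : Int) - 1).toNat by omega]
    apply List.map_congr_left
    intro k hk
    rw [List.mem_range] at hk
    simp only [Function.comp]
    rw [pvRowB_mid (4 * LEN - 3) (4 * LEN - 1) (0 + 1 + 1 + 1 + (k : Int)) (by omega) (by ring) (by omega) (by omega)]
    rw [show (0 + 1 + 1 + 1 + (k : Int) - 2) = 1 + (k : Int) by ring,
        show (4 * LEN - 3 - 4 : Int) = 4 * (LEN - 1) - 3 by ring,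
        show (4 * LEN - 1 - 4 : Int) = 4 * (LEN - 1) - 1 by ring]
    rfl
  rw [hmid,
      pvRowB_zero (4 * LEN - 3) (4 * LEN - 1) (by omega) (by ring),
      pvRowB_one' (4 * LEN - 3) (4 * LEN - 1) (0 + 1) (by omega) (by ring) (by norm_num),
      pvRowB_two' (4 * LEN - 3) (4 * LEN - 1) (0 + 1 + 1) (by omega) (by ring) (by norm_num),
      pvRowB_botTwo' (4 * LEN - 3) (4 * LEN - 1) (4 * LEN - 3) (by omega) (by ring) (by omega),
      pvRowB_botOne' (4 * LEN - 3) (4 * LEN - 1) (4 * LEN - 3 + 1) (by omega) (by ring) (by omega),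
      pvRowB_zero (4 * (LEN - 1) - 3) (4 * (LEN - 1) - 1) hW hH]
  -- boundary strings coincide
  rw [show (1 + 4 * (LEN - 1) : Int) = 4 * LEN - 3 by ring,
      show (4 * (LEN - 1) : Int) = 4 * LEN - 3 - 1 by ring,
      show (4 * LEN - 3 - 1 - 1 : Int) = 4 * LEN - 3 - 2 by ring,
      show (4 * LEN - 3 - 1 - 3 : Int) = 4 * (LEN - 1) - 3 by ring]
  rw [PySem.List.pyRepeat_singleton ('*') (4 * LEN - 3 - 2), PySem.List.pyRepeat_singleton ('*') (4 * (LEN - 1) - 3),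
      show ((4 * LEN - 3 - 2 : Int)).toNat = ((4 * (LEN - 1) - 3 : Int)).toNat + 2 by omega,
      List.replicate_add]
  simp

lemma pvGridB_base : pvGridB 2 = pvBase := by decide

lemma pvGoA_eq_gridB : ∀ (m : Nat) (LEN : Int), 2 ≤ LEN → (LEN - 2).toNat = m →
    pvGoA (LEN - 1).toNat LEN = pvGridB LEN := by
  intro m
  induction m with
  | zero =>
    intro LEN h2 hm
    have : LEN = 2 := by omega
    subst this
    rw [show ((2:Int) - 1).toNat = 1 by norm_num]
    simp only [pvGoA]
    exact pvGridB_base.symm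
  | succ m ih =>
    intro LEN h2 hm
    have h3 : 3 ≤ LEN := by omega
    rw [show (LEN - 1).toNat = (LEN - 2).toNat + 1 by omega]
    simp only [pvGoA]
    rw [if_neg (by omega), show (LEN - 2).toNat = (LEN - 1 - 1).toNat by omega,
        ih (LEN - 1) (by omega) (by omega), ← pvGridB_step LEN h3]

-- ===== VERDICT (by name: the statement is the Claim_ definition above) =====
theorem append_star_spec : Claim_equal_append_star := by
  intro LEN _ hpre
  unfold Pre_append_star at hpre
  unfold Spec_append_star
  rw [pvGridB_alt LEN (by omega), append_star, pvGoA_eq_gridB (LEN - 2).toNat LEN (by omega) rfl]
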